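-- pv_equiv track=rewrite | github.com/Waino/fancytail | fancytail/fancytail.py | divide_screen
-- ===== SOURCE A (Python) =====
-- from typing import Optional, TextIO, Tuple, List
--
-- def divide_screen(n_files: int, screen_size: int) -> List[int]:
--     """Divide the screen among the watched files"""
--     if n_files == 0:
--         return []
--     if n_files > screen_size:
--         return [1] * screen_size
--     lines_per_file = screen_size // n_files
--     extra_lines = screen_size % n_files
--     sizes = [lines_per_file] * n_files
--     for i in range(extra_lines):
--         sizes[i] += 1
--     return sizes
-- ===== SOURCE B (Python) =====
-- from typing import List
--
--
-- def divide_screen(n_files: int, screen_size: int) -> List[int]: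
--     """Divide the screen among the watched files"""
--     if n_files == 0:
--         return []
--     if n_files > screen_size:
--         return [1] * screen_size
--     sizes = []
--     remaining = screen_size
--     files_left = n_files
--     while files_left > 0:
--         share = -(-remaining // files_left)  # ceiling division: this file's fair share
--         sizes.append(share)
--         remaining -= share
--         files_left -= 1
--     return sizes
-- ===== Notes on version B (the rewrite author's own statement) =====
-- stated objective: alternative
-- what changed: Replaces the divmod-based uniform-fill-plus-increment-loop with a greedy single loop that repeatedly hands each file the ceiling of remaining/files_left and subtracts it, so no quotient/remainder precomputation or list mutation is needed.
import Mathlib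
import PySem

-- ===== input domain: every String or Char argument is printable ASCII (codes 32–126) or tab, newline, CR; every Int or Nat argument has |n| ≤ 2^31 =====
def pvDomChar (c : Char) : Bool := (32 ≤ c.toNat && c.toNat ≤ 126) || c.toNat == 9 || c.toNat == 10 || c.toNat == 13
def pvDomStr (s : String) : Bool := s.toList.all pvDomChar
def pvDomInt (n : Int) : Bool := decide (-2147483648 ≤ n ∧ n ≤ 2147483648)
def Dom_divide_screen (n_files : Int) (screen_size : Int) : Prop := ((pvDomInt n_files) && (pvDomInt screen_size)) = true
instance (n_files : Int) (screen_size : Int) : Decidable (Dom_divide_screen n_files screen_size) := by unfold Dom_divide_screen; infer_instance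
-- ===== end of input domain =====

-- B replaces the divmod fill-then-increment scheme with a greedy loop handing each file ceil(remaining/files_left); alternative decomposition, same cost.

-- ===== PORT A =====
-- 'sizes[i] += 1': i ranges over range(extra_lines) with 0 ≤ i < len(sizes) whenever the
-- loop body runs in Python, so set/getD at i.toNat is exact there.
def divide_screen (n_files : Int) (screen_size : Int) : List Int :=
  if n_files == 0 then []
  else if n_files > screen_size then List.replicate screen_size.toNat 1
  else
    let lines_per_file := PySem.Int.floordiv screen_size n_files
    let extra_lines := PySem.Int.mod screen_size n_files
    let sizes := List.replicate n_files.toNat lines_per_file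
    (PySem.List.pyRange 0 extra_lines 1).foldl
      (fun s i => s.set i.toNat (s.getD i.toNat 0 + 1)) sizes

-- ===== PORT B =====
-- the while loop decrements files_left from n_files to 0, so files_left.toNat is exact fuel
-- (the loop body never runs when files_left ≤ 0); '-(-remaining // files_left)' is the
-- ceiling-division idiom, ported literally via PySem.Int.floordiv.
def dsLoop (remaining : Int) : Nat → List Int
  | 0 => []
  | left + 1 =>
    let share := -(PySem.Int.floordiv (-remaining) ((left : Int) + 1))
    share :: dsLoop (remaining - share) left

def divide_screen_alt (n_files : Int) (screen_size : Int) : List Int :=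
  if n_files == 0 then []
  else if n_files > screen_size then List.replicate screen_size.toNat 1
  else dsLoop screen_size n_files.toNat

-- ===== PRECONDITION & SPEC =====
def Spec_divide_screen (n_files : Int) (screen_size : Int) (out : List Int) : Prop := out = divide_screen_alt n_files screen_size
instance (n_files : Int) (screen_size : Int) (out : List Int) : Decidable (Spec_divide_screen n_files screen_size out) := by unfold Spec_divide_screen; infer_instance

-- ===== CLAIM (what is proved, stated in full; the proofs are below) =====
def Claim_equal_divide_screen : Prop := ∀ (n_files : Int) (screen_size : Int), Dom_divide_screen n_files screen_size → Spec_divide_screen n_files screen_size (divide_screen n_files screen_size)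

-- ===== LEMMAS AND PROOFS =====

-- the increment loop on the empty list does nothing
theorem pv_foldl_set_nil (l : List Int) :
    l.foldl (fun (s : List Int) (i : Int) => s.set i.toNat (s.getD i.toNat 0 + 1)) [] = [] := by
  induction l with
  | nil => rfl
  | cons a t ih => simpa using ih

-- A's fill-then-increment loop, characterised elementwise
theorem pv_loop_char (v : Int) (n : Nat) :
    ∀ (e : Nat), e ≤ n →
    (List.range e).foldl (fun (s : List Int) (k : Nat) => s.set k (s.getD k 0 + 1))
        (List.replicate n v)
      = (List.range n).map (fun k => if k < e then v + 1 else v) := by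
  intro e
  induction e with
  | zero =>
    intro _
    simp [List.map_const']
  | succ e ih =>
    intro he
    have he' : e < n := he
    rw [List.range_succ, List.foldl_append, ih (Nat.le_of_lt he')]
    simp only [List.foldl_cons, List.foldl_nil]
    have hlen : ((List.range n).map (fun k => if k < e then v + 1 else v)).length = n := by simp
    have hgd : ((List.range n).map (fun k => if k < e then v + 1 else v)).getD e 0 = v := by
      rw [List.getD_eq_getElem _ _ (by simpa [hlen] using he')]
      simp
    rw [hgd]
    apply List.ext_getElem (by simp)
    intro j hj hj'
    have hjn : j < n := by simpa using hj'
    by_cases hje : j = e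
    · subst hje
      simp
    · rw [List.getElem_set_ne (by omega)]
      have : j < e ↔ j < e + 1 := by omega
      simp [this]

-- the ceiling share '-(-rem // left)' in terms of floor quotient and remainder
theorem pv_share_eq (rem n : Int) (hn : 0 < n) :
    -(PySem.Int.floordiv (-rem) n) = if rem % n = 0 then rem / n else rem / n + 1 := by
  have hsn : n * (rem / n) + rem % n = rem := Int.mul_ediv_add_emod rem n
  have hr0 : 0 ≤ rem % n := Int.emod_nonneg rem (by omega)
  have hrn : rem % n < n := Int.emod_lt_of_pos rem hn
  by_cases h : rem % n = 0
  · rw [if_pos h, PySem.Int.neg_floordiv_neg_eq_iff_of_pos hn]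
    constructor <;> nlinarith
  · have hrpos : 0 < rem % n := lt_of_le_of_ne hr0 (Ne.symm h)
    rw [if_neg h, PySem.Int.neg_floordiv_neg_eq_iff_of_pos hn]
    constructor <;> nlinarith

-- B's greedy loop, characterised elementwise (same shape as pv_loop_char's right side)
theorem pv_dsLoop_char : ∀ (m : Nat) (rem : Int),
    dsLoop rem m
      = (List.range m).map
          (fun (k : Nat) => if (k : Int) < rem % (m : Int) then rem / (m : Int) + 1 else rem / (m : Int)) := by
  intro m
  induction m with
  | zero => intro rem; rfl
  | succ m ih =>
    intro rem
    have hn : (0 : Int) < (m : Int) + 1 := by positivity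
    have hsn : ((m : Int) + 1) * (rem / ((m : Int) + 1)) + rem % ((m : Int) + 1) = rem :=
      Int.mul_ediv_add_emod rem ((m : Int) + 1)
    have hr0 : 0 ≤ rem % ((m : Int) + 1) := Int.emod_nonneg rem (by omega)
    have hrn : rem % ((m : Int) + 1) < (m : Int) + 1 := Int.emod_lt_of_pos rem hn
    set q := rem / ((m : Int) + 1) with hq
    set r := rem % ((m : Int) + 1) with hr
    have hshare : -(PySem.Int.floordiv (-rem) ((m : Int) + 1)) = if r = 0 then q else q + 1 :=
      pv_share_eq rem ((m : Int) + 1) hn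
    rw [dsLoop]
    simp only [List.range_succ_eq_map, List.map_cons, List.map_map, Function.comp_def]
    rw [show (((m : Nat) + 1 : Nat) : Int) = (m : Int) + 1 by push_cast; ring]
    rw [← hq, ← hr, hshare]
    by_cases h0 : r = 0
    · -- share = q, remaining' = rem - q = m*q, every later slot gets q
      rw [if_pos h0]
      rcases Nat.eq_zero_or_pos m with hm | hm
      · subst hm; simp [dsLoop, h0]
      · have hmpos : (0 : Int) < (m : Int) := by exact_mod_cast hm
        have hrem' : rem - q = (m : Int) * q := by rw [h0] at hsn; nlinarith
        have hq' : (rem - q) / (m : Int) = q := by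
          rw [hrem', Int.mul_ediv_cancel_left _ (by omega)]
        have hr' : (rem - q) % (m : Int) = 0 := by
          rw [hrem', Int.mul_emod_right]
        rw [ih, hq', hr']
        congr 1
        · simp [h0]
        · apply List.map_congr_left
          intro k hk
          rw [if_neg (by omega), if_neg (by rw [h0]; push_cast; omega)]
    · -- share = q+1, remaining' = m*q + (r-1)
      rw [if_neg h0]
      have hm : 0 < m := by
        by_contra hm
        have : m = 0 := by omega
        subst this
        simp at hrn hr0
        omega
      have hmpos : (0 : Int) < (m : Int) := by exact_mod_cast hm
      have hrem' : rem - (q + 1) = (m : Int) * q + (r - 1) := by nlinarith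
      have hb1 : (0 : Int) ≤ r - 1 := by omega
      have hb2 : r - 1 < (m : Int) := by omega
      have hq' : (rem - (q + 1)) / (m : Int) = q := by
        rw [hrem', add_comm, Int.add_mul_ediv_left _ _ (by omega : (m : Int) ≠ 0),
          Int.ediv_eq_zero_of_lt hb1 hb2]
        ring
      have hr' : (rem - (q + 1)) % (m : Int) = r - 1 := by
        rw [hrem', add_comm, Int.add_mul_emod_self_left, Int.emod_eq_of_lt hb1 hb2]
      rw [ih, hq', hr']
      congr 1
      · rw [if_pos (by omega)]
      · apply List.map_congr_left
        intro k hk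
        by_cases hkr : (k : Int) < r - 1
        · rw [if_pos hkr, if_pos (by push_cast; omega)]
        · rw [if_neg hkr, if_neg (by push_cast; omega)]

theorem pv_eq (n_files screen_size : Int) :
    divide_screen n_files screen_size = divide_screen_alt n_files screen_size := by
  unfold divide_screen divide_screen_alt
  simp only [beq_iff_eq]
  split_ifs with h0 hgt
  · rfl
  · rfl
  · rcases lt_trichotomy n_files 0 with hneg | hz | hpos
    · -- n_files < 0: both sides are []
      have h2 : n_files.toNat = 0 := Int.toNat_of_nonpos (by omega)
      simp only [h2, List.replicate_zero, dsLoop]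
      exact pv_foldl_set_nil _
    · exact absurd hz h0
    · -- 0 < n_files ≤ screen_size
      set q := PySem.Int.floordiv screen_size n_files with hq
      set r := PySem.Int.mod screen_size n_files with hr
      have hqe : q = screen_size / n_files := PySem.Int.floordiv_eq_ediv_of_pos hpos
      have hre : r = screen_size % n_files := PySem.Int.mod_eq_emod_of_pos hpos
      have hr0 : 0 ≤ r := hre ▸ Int.emod_nonneg screen_size (by omega)
      have hrn : r < n_files := hre ▸ Int.emod_lt_of_pos screen_size hpos
      rw [PySem.List.pyRange_one 0 r]
      simp only [sub_zero, List.foldl_map, zero_add, Int.toNat_natCast]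
      rw [pv_loop_char q n_files.toNat r.toNat (by omega)]
      rw [pv_dsLoop_char n_files.toNat screen_size]
      have hcast : ((n_files.toNat : Int)) = n_files := Int.toNat_of_nonneg (le_of_lt hpos)
      apply List.map_congr_left
      intro k hk
      rw [hcast, ← hqe, ← hre]
      have h3 : k < r.toNat ↔ (k : Int) < r := by omega
      simp [h3]

-- ===== VERDICT (by name: the statement is the Claim_ definition above) =====
theorem divide_screen_spec : Claim_equal_divide_screen := by
  intro n s _
  unfold Spec_divide_screen
  exact pv_eq n s
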